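-- pv_equiv track=rewrite | github.com/Athena96/Film-Festival-Search-Engine | search.py | vocab_vector_from_query
-- ===== SOURCE A (Python) =====
-- def vocab_vector_from_query(phrase,vocabulary):
--     '''
--     creates a vocabulary vector using the given phrase
--     this is used to convert the user's input to a vocabulary vector.
--     '''
--     # vocabulary = ["the","tree","it", ...]
--     # phrase = ["the", "tree", ...]
--
--     # init vocab vectors
--     vocab_vector = []
--     if len(phrase) == 1 and (phrase[0] == "" or phrase[0] == " "):
--         vocab_vector.append(len(vocabulary))
--         return vocab_vector
--
--     for vocab_idx,word in enumerate(vocabulary):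
--
--         if word in phrase:
--             if (len(vocab_vector) == 0):
--                 vocab_vector.append(len(vocabulary))
--
--             vocab_vector.append(vocab_idx)
--     return vocab_vector
-- ===== SOURCE B (Python) =====
-- def vocab_vector_from_query(phrase, vocabulary):
--     '''
--     creates a vocabulary vector using the given phrase
--     (inverted-index re-implementation: one pass over the vocabulary to
--     build word -> indices, then one pass over the phrase tokens)
--     '''
--     if len(phrase) == 1 and (phrase[0] == "" or phrase[0] == " "):
--         return [len(vocabulary)]
--     index = {}
--     for i, word in enumerate(vocabulary):
--         index.setdefault(word, []).append(i)
--     hits = set()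
--     for token in phrase:
--         hits.update(index.get(token, []))
--     out = sorted(hits)
--     if out:
--         out = [len(vocabulary)] + out
--     return out
-- ===== Notes on version B (the rewrite author's own statement) =====
-- stated objective: faster
-- what changed: Instead of scanning the vocabulary and testing each word for membership in the phrase, B builds an inverted index (word -> list of indices) in one pass over the vocabulary, collects the hit indices into a set in one pass over the phrase, and returns the sorted set with len(vocabulary) prepended when non-empty.
import Mathlib
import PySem

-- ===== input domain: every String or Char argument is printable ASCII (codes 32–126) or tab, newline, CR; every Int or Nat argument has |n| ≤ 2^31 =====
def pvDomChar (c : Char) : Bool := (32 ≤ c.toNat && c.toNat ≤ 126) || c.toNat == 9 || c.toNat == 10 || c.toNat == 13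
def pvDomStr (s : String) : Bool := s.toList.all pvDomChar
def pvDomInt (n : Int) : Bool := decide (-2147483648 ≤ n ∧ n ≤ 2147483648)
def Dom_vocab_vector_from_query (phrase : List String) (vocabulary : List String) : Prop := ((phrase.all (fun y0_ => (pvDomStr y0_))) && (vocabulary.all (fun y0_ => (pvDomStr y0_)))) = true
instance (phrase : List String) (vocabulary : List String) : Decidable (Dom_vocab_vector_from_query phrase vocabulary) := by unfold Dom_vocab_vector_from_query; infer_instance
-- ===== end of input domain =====

-- B replaces A's vocabulary scan with substring-membership tests by an inverted index
-- (word -> indices) plus one pass over the phrase collecting a set; objective: faster.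


-- ===== PORT A =====
def vocab_vector_from_query (phrase : List String) (vocabulary : List String) : List Int :=
  if phrase.length = 1 ∧ (phrase.headI = "" ∨ phrase.headI = " ") then
    [(vocabulary.length : Int)]
  else
    (PySem.List.enumerate vocabulary 0).foldl
      (fun acc p =>
        if p.2 ∈ phrase then
          (if acc.length = 0 then acc ++ [(vocabulary.length : Int)] else acc) ++ [p.1]
        else acc)
      []

-- ===== PORT B =====
def vocab_vector_from_query_alt (phrase : List String) (vocabulary : List String) : List Int :=
  if phrase.length = 1 ∧ (phrase.headI = "" ∨ phrase.headI = " ") then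
    [(vocabulary.length : Int)]
  else
    let index : PySem.Dict String (List Int) :=
      (PySem.List.enumerate vocabulary 0).foldl
        (fun d p => d.modify p.2 [] (· ++ [p.1])) PySem.Dict.empty
    let hits : PySem.Set Int :=
      phrase.foldl (fun s t => PySem.Set.update s (index.getD t [])) PySem.Set.empty
    let out := PySem.List.sorted hits (fun x => x) false
    if out = [] then out else (vocabulary.length : Int) :: out

-- ===== PRECONDITION & SPEC =====
def Spec_vocab_vector_from_query (phrase : List String) (vocabulary : List String) (out : List Int) : Prop := out = vocab_vector_from_query_alt phrase vocabulary
instance (phrase : List String) (vocabulary : List String) (out : List Int) : Decidable (Spec_vocab_vector_from_query phrase vocabulary out) := by unfold Spec_vocab_vector_from_query; infer_instance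

-- ===== CLAIM (what is proved, stated in full; the proofs are below) =====
def Claim_equal_vocab_vector_from_query : Prop := ∀ (phrase : List String) (vocabulary : List String), Dom_vocab_vector_from_query phrase vocabulary → Spec_vocab_vector_from_query phrase vocabulary (vocab_vector_from_query phrase vocabulary)

-- ===== LEMMAS AND PROOFS =====

-- hit indices, in vocabulary order
def pvFilt (phrase : List String) (l : List (Int × String)) : List Int :=
  (l.filter (fun p => decide (p.2 ∈ phrase))).map (·.1)

-- A's loop from a nonempty accumulator only appends hit indices
theorem loopA_nonempty (phrase : List String) (n : Int) (l : List (Int × String))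
    (acc : List Int) (h : acc ≠ []) :
    l.foldl (fun acc p =>
        if p.2 ∈ phrase then
          (if acc.length = 0 then acc ++ [n] else acc) ++ [p.1]
        else acc) acc
      = acc ++ pvFilt phrase l := by
  induction l generalizing acc with
  | nil => simp [pvFilt]
  | cons p t ih =>
    simp only [List.foldl_cons]
    by_cases hp : p.2 ∈ phrase
    · rw [if_pos hp, if_neg (by simp [h]), ih (acc ++ [p.1]) (by simp)]
      simp [pvFilt, hp]
    · rw [if_neg hp, ih acc h]
      simp [pvFilt, hp]

-- A's loop from the empty accumulator
theorem loopA_nil (phrase : List String) (n : Int) (l : List (Int × String)) :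
    l.foldl (fun acc p =>
        if p.2 ∈ phrase then
          (if acc.length = 0 then acc ++ [n] else acc) ++ [p.1]
        else acc) []
      = if pvFilt phrase l = [] then [] else n :: pvFilt phrase l := by
  induction l with
  | nil => simp [pvFilt]
  | cons p t ih =>
    simp only [List.foldl_cons]
    by_cases hp : p.2 ∈ phrase
    · rw [if_pos hp, if_pos (by simp), loopA_nonempty phrase n t ([] ++ [n] ++ [p.1]) (by simp)]
      simp [pvFilt, hp]
    · rw [if_neg hp, ih]
      have hfc : List.filter (fun p => decide (p.2 ∈ phrase)) (p :: t)
          = List.filter (fun p => decide (p.2 ∈ phrase)) t :=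
        List.filter_cons_of_neg (by simp [hp])
      simp only [pvFilt]
      rw [hfc]

-- membership in Set.update
theorem mem_set_update {α : Type} [BEq α] [LawfulBEq α] (s : PySem.Set α) (xs : List α) (y : α) :
    y ∈ PySem.Set.update s xs ↔ y ∈ s ∨ y ∈ xs := by
  induction xs generalizing s with
  | nil => simp [PySem.Set.update]
  | cons x t ih =>
    simp [PySem.Set.update] at ih ⊢
    rw [ih, PySem.Set.mem_add]
    constructor
    · rintro ((h | h) | h) <;> simp [h]
    · rintro (h | h | h) <;> simp [h]

theorem nodup_set_update {α : Type} [BEq α] [LawfulBEq α] (s : PySem.Set α) (xs : List α)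
    (h : s.Nodup) : (PySem.Set.update s xs).Nodup := by
  induction xs generalizing s with
  | nil => simpa [PySem.Set.update]
  | cons x t ih =>
    simp only [PySem.Set.update, List.foldl_cons] at ih ⊢
    exact ih _ (by simpa using PySem.Set.nodup_add (s := s) x h)

-- what B's inverted index returns for a token
theorem index_getD (l : List (Int × String)) (t : String) :
    ((l.foldl (fun d p => d.modify p.2 [] (· ++ [p.1])) PySem.Dict.empty).getD t [])
      = (l.filter (fun p => p.2 == t)).map (·.1) := by
  have hmap : l.foldl (fun d p => d.modify p.2 [] (· ++ [p.1])) PySem.Dict.empty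
      = (l.map (fun p => (p.2, p.1))).foldl (fun d p => d.modify p.1 [] (· ++ [p.2])) PySem.Dict.empty := by
    rw [List.foldl_map]
  rw [hmap, PySem.Dict.getD_foldl_modify_append]
  simp [List.filter_map, Function.comp_def]

-- membership in B's hit set
theorem mem_hits (phrase : List String) (l : List (Int × String)) (i : Int) :
    (i ∈ phrase.foldl
        (fun s t => PySem.Set.update s
          ((l.foldl (fun d p => d.modify p.2 [] (· ++ [p.1])) PySem.Dict.empty).getD t []))
        PySem.Set.empty)
      ↔ i ∈ pvFilt phrase l := by
  have key : ∀ (s : PySem.Set Int),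
      (i ∈ phrase.foldl
        (fun s t => PySem.Set.update s
          ((l.foldl (fun d p => d.modify p.2 [] (· ++ [p.1])) PySem.Dict.empty).getD t [])) s)
      ↔ i ∈ s ∨ ∃ t ∈ phrase, ∃ p ∈ l, p.2 = t ∧ p.1 = i := by
    induction phrase with
    | nil => simp
    | cons t ts ih =>
      intro s
      rw [List.foldl_cons, ih, mem_set_update, index_getD]
      simp only [List.mem_map, List.mem_filter, beq_iff_eq, List.mem_cons]
      constructor
      · rintro ((h | ⟨p, ⟨hpl, hpt⟩, hpi⟩) | ⟨u, hu, p, hpl, hpu, hpi⟩)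
        · exact Or.inl h
        · exact Or.inr ⟨t, Or.inl rfl, p, hpl, hpt, hpi⟩
        · exact Or.inr ⟨u, Or.inr hu, p, hpl, hpu, hpi⟩
      · rintro (h | ⟨u, (rfl | hu), p, hpl, hpu, hpi⟩)
        · exact Or.inl (Or.inl h)
        · exact Or.inl (Or.inr ⟨p, ⟨hpl, hpu⟩, hpi⟩)
        · exact Or.inr ⟨u, hu, p, hpl, hpu, hpi⟩
  rw [key]
  have h2 : i ∉ (PySem.Set.empty : PySem.Set Int) := by simp [PySem.Set.empty]
  simp only [pvFilt, List.mem_map, List.mem_filter, decide_eq_true_eq]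
  constructor
  · rintro (h | ⟨t, ht, p, hpl, hpt, hpi⟩)
    · exact absurd h h2
    · exact ⟨p, ⟨hpl, hpt ▸ ht⟩, hpi⟩
  · rintro ⟨p, ⟨hpl, hpt⟩, hpi⟩
    exact Or.inr ⟨p.2, hpt, p, hpl, rfl, hpi⟩

-- pvFilt is strictly increasing, hence sorted(hits) = pvFilt
theorem pairwise_pvFilt (phrase : List String) (vocabulary : List String) :
    (pvFilt phrase (PySem.List.enumerate vocabulary 0)).Pairwise (· < ·) := by
  unfold pvFilt
  refine List.Pairwise.map _ (fun p q h => h) ?_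
  exact (PySem.List.pairwise_lt_enumerate vocabulary 0).filter _

theorem sorted_hits_eq (phrase : List String) (vocabulary : List String) :
    PySem.List.sorted
      (phrase.foldl
        (fun s t => PySem.Set.update s
          (((PySem.List.enumerate vocabulary 0).foldl
              (fun d p => d.modify p.2 [] (· ++ [p.1])) PySem.Dict.empty).getD t []))
        PySem.Set.empty)
      (fun x => x) false
      = pvFilt phrase (PySem.List.enumerate vocabulary 0) := by
  apply PySem.List.sorted_eq_of_perm_of_pairwise_lt
  · apply (List.perm_ext_iff_of_nodup ?_ ?_).mpr
    · intro i; exact (mem_hits phrase _ i).symm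
    · exact (pairwise_pvFilt phrase vocabulary).nodup
    · have : ∀ (ph : List String) (s : PySem.Set Int), s.Nodup →
          (ph.foldl (fun s t => PySem.Set.update s
            (((PySem.List.enumerate vocabulary 0).foldl
              (fun d p => d.modify p.2 [] (· ++ [p.1])) PySem.Dict.empty).getD t [])) s).Nodup := by
        intro ph
        induction ph with
        | nil => intro s hs; simpa
        | cons t ts ih => intro s hs; exact ih _ (nodup_set_update _ _ hs)
      exact this phrase PySem.Set.empty (by simp [PySem.Set.empty])
  · exact pairwise_pvFilt phrase vocabulary

-- ===== VERDICT (by name: the statement is the Claim_ definition above) =====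
theorem vocab_vector_from_query_spec : Claim_equal_vocab_vector_from_query := by
  intro phrase vocabulary _
  unfold Spec_vocab_vector_from_query vocab_vector_from_query vocab_vector_from_query_alt
  by_cases hguard : phrase.length = 1 ∧ (phrase.headI = "" ∨ phrase.headI = " ")
  · rw [if_pos hguard, if_pos hguard]
  · rw [if_neg hguard, if_neg hguard]
    simp only
    rw [sorted_hits_eq phrase vocabulary, loopA_nil phrase (vocabulary.length : Int)]
    by_cases hf : pvFilt phrase (PySem.List.enumerate vocabulary 0) = []
    · simp [hf]
    · simp [hf]
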